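-- pv_equiv track=rewrite | github.com/Daeell/AlGORITM-STUDY | programmers/42626/mjh.py | solution
-- ===== SOURCE A (Python) =====
-- from heapq import heappush, heappop, heapify
--
-- def solution(scoville, K):
--     answer = 0
--     heapify(scoville)
--
--     while scoville[0] < K:
--         a = heappop(scoville)
--         if not scoville:
--             heappush(scoville, a)
--             break
--         b = heappop(scoville)
--         heappush(scoville, a + b*2)
--         answer += 1
--
--     return answer if scoville[0] >= K else -1
-- ===== SOURCE B (Python) =====
-- def solution(scoville, K):
--     # Two-queue technique: sort once, then merge with two FIFO queues
--     # (q1 = sorted originals consumed by index i, q2 = merged values consumed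
--     # by index j; merged values are appended in nondecreasing order, so the
--     # smallest remaining element is always one of the two fronts — no heap,
--     # no insertion).  Does not mutate `scoville` (A heapifies it in place).
--     q1 = sorted(scoville)
--     q2 = []
--     i = j = 0
--     answer = 0
--     while True:
--         if i < len(q1) and (j >= len(q2) or q1[i] <= q2[j]):
--             m = q1[i]
--         else:
--             m = q2[j]  # IndexError exactly when scoville is empty
--         if m >= K:
--             return answer
--         if (len(q1) - i) + (len(q2) - j) < 2:
--             return -1
--         vals = []
--         for _ in range(2):
--             if i < len(q1) and (j >= len(q2) or q1[i] <= q2[j]):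
--                 vals.append(q1[i]); i += 1
--             else:
--                 vals.append(q2[j]); j += 1
--         a, b = vals
--         q2.append(a + 2 * b)
--         answer += 1
-- ===== Notes on version B (the rewrite author's own statement) =====
-- stated objective: alternative
-- what changed: Replaces the binary heap by the two-queue merging technique: sort once, then consume a FIFO queue of sorted originals and a FIFO queue of merged values (which come out in nondecreasing order) from their fronts, so each merge is O(1) with no heap operations and no insertion.
import Mathlib
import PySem

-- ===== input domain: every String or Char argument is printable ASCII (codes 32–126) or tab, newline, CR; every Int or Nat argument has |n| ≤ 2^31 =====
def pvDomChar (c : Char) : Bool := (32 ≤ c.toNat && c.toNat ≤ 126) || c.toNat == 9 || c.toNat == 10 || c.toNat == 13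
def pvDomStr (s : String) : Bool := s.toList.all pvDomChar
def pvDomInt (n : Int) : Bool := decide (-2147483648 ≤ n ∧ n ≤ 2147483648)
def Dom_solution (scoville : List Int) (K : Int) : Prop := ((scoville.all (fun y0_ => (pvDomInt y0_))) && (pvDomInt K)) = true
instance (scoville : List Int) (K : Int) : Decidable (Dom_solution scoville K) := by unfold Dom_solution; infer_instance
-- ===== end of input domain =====

-- B replaces A's binary heap by the two-queue merging technique: sort once, then consume a
-- queue of sorted originals and a queue of merged values (appended in nondecreasing order)
-- from their fronts — no heap and no insertion.  Equivalence is about the RETURN value only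
-- (A heapifies `scoville` in place; B does not mutate it).

-- ===== PORT A =====
-- A keeps `scoville` as a heapq heap.  The heap is modelled by the list of its elements:
-- `scoville[0]` on a heap is its minimum, `heappop` removes (one occurrence of) the minimum,
-- `heappush` adds an element.  These stdlib calls are ported by those contracts (min? / erase / append).
def solutionGo (l : List Int) (K : Int) (answer : Int) : Int :=
  match hm : l.min? with
  | none => -1          -- unreachable under Pre_ (the loop keeps the heap nonempty)
  | some a =>
    if a < K then
      let l1 := l.erase a                 -- a = heappop(scoville)
      match hm1 : l1.min? with
      | none => -1                        -- heap empty: push a back, break; then a < K, so -1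
      | some b =>
        -- b = heappop(scoville); heappush(scoville, a + b*2)
        solutionGo ((l1.erase b) ++ [a + b * 2]) K (answer + 1)
    else answer
termination_by l.length
decreasing_by
  have ha : a ∈ l := (List.min?_eq_some_iff.mp hm).1
  have hb : b ∈ l.erase a := (List.min?_eq_some_iff.mp hm1).1
  have h1 : (l.erase a).length = l.length - 1 := List.length_erase_of_mem ha
  have h2 : ((l.erase a).erase b).length = (l.erase a).length - 1 := List.length_erase_of_mem hb
  have h3 : 0 < l.length := List.length_pos_of_mem ha
  have h4 : 0 < (l.erase a).length := List.length_pos_of_mem hb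
  simp only [List.length_append, List.length_cons, List.length_nil]
  omega

def solution (scoville : List Int) (K : Int) : Int :=
  solutionGo scoville K 0

-- ===== PORT B =====
-- Source B keeps two index pointers i, j into q1 (the sorted input) and q2 (the merged values);
-- here each queue is modelled by its unconsumed suffix, so advancing a pointer is dropping
-- the head.  popMin is Source B's repeated front test `i < len(q1) and (j >= len(q2) or q1[i] <= q2[j])`.
def popMin : List Int → List Int → Option (Int × List Int × List Int)
  | [], [] => none
  | x :: t1, [] => some (x, t1, [])
  | [], y :: t2 => some (y, [], t2)
  | x :: t1, y :: t2 => if x ≤ y then some (x, t1, y :: t2) else some (y, x :: t1, t2)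

theorem popMin_length (q1 q2 r1 r2 : List Int) (a : Int)
    (h : popMin q1 q2 = some (a, r1, r2)) :
    r1.length + r2.length + 1 = q1.length + q2.length := by
  match q1, q2 with
  | [], [] => simp [popMin] at h
  | x :: t1, [] => simp [popMin] at h; obtain ⟨_, h1, h2⟩ := h; subst h1; subst h2; simp
  | [], y :: t2 => simp [popMin] at h; obtain ⟨_, h1, h2⟩ := h; subst h1; subst h2; simp
  | x :: t1, y :: t2 =>
    simp only [popMin] at h
    split at h <;> (simp at h; obtain ⟨_, h1, h2⟩ := h; subst h1; subst h2; simp) <;> omega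

def solutionAltGo (q1 q2 : List Int) (K : Int) (ans : Int) : Int :=
  match h : popMin q1 q2 with
  | none => -1          -- both queues empty: only reachable from empty input (outside Pre_)
  | some (a, r1, r2) =>
    if K ≤ a then ans                     -- `if m >= K: return answer`
    else
      match h2 : popMin r1 r2 with
      | none => -1                        -- fewer than 2 elements left: `return -1`
      | some (b, s1, s2) =>
        solutionAltGo s1 (s2 ++ [a + 2 * b]) K (ans + 1)   -- q2.append(a + 2*b)
termination_by q1.length + q2.length
decreasing_by
  have e1 := popMin_length _ _ _ _ _ h
  have e2 := popMin_length _ _ _ _ _ h2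
  simp only [List.length_append, List.length_cons, List.length_nil]
  omega

def solution_alt (scoville : List Int) (K : Int) : Int :=
  solutionAltGo (PySem.List.sorted scoville (fun x => x) false) [] K 0

-- ===== PRECONDITION & SPEC =====
-- Pre_ excludes only the empty list, on which both Pythons raise IndexError.
def Pre_solution (scoville : List Int) (K : Int) : Prop := scoville ≠ []
instance (scoville : List Int) (K : Int) : Decidable (Pre_solution scoville K) := by unfold Pre_solution; infer_instance
def pvWitness_solution : List Int × Int := ([1, 2, 3, 9, 10, 12], 7)

def Spec_solution (scoville : List Int) (K : Int) (out : Int) : Prop := out = solution_alt scoville K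
instance (scoville : List Int) (K : Int) (out : Int) : Decidable (Spec_solution scoville K out) := by unfold Spec_solution; infer_instance

-- ===== CLAIM (what is proved, stated in full; the proofs are below) =====
def Claim_equal_solution : Prop := ∀ (scoville : List Int) (K : Int), Dom_solution scoville K → Pre_solution scoville K → Spec_solution scoville K (solution scoville K)

-- ===== LEMMAS AND PROOFS =====

-- min? only depends on the multiset of elements
theorem min?_congr_perm (l l' : List Int) (h : l.Perm l') : l.min? = l'.min? := by
  cases hl : l.min? with
  | none =>
    have : l = [] := List.min?_eq_none_iff.mp hl
    subst this
    have : l' = [] := List.perm_nil.mp h.symm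
    subst this; rfl
  | some a =>
    obtain ⟨ha, hb⟩ := List.min?_eq_some_iff.mp hl
    exact (List.min?_eq_some_iff.mpr
      ⟨h.subset ha, fun c hc => hb c (h.symm.subset hc)⟩).symm

theorem popMin_eq_none (q1 q2 : List Int) (h : popMin q1 q2 = none) : q1 = [] ∧ q2 = [] := by
  match q1, q2 with
  | [], [] => exact ⟨rfl, rfl⟩
  | x :: t1, [] => simp [popMin] at h
  | [], y :: t2 => simp [popMin] at h
  | x :: t1, y :: t2 => simp only [popMin] at h; split at h <;> simp at h

-- popping the smaller front of two sorted queues removes the multiset minimum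
theorem popMin_spec (q1 q2 r1 r2 : List Int) (a : Int)
    (hs1 : q1.Pairwise (· ≤ ·)) (hs2 : q2.Pairwise (· ≤ ·))
    (h : popMin q1 q2 = some (a, r1, r2)) :
    (a :: (r1 ++ r2)).Perm (q1 ++ q2) ∧ (∀ c ∈ q1 ++ q2, a ≤ c) ∧
      r1.Sublist q1 ∧ r2.Sublist q2 := by
  match q1, q2 with
  | [], [] => simp [popMin] at h
  | x :: t1, [] =>
    simp [popMin] at h
    obtain ⟨h0, h1, h2⟩ := h; subst h0; subst h1; subst h2
    refine ⟨by simp, ?_, List.sublist_cons_self x t1, List.Sublist.refl _⟩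
    intro c hc
    simp only [List.append_nil, List.mem_cons] at hc
    rcases hc with hc | hc
    · exact le_of_eq hc.symm
    · exact (List.pairwise_cons.mp hs1).1 c hc
  | [], y :: t2 =>
    simp [popMin] at h
    obtain ⟨h0, h1, h2⟩ := h; subst h0; subst h1; subst h2
    refine ⟨by simp, ?_, List.Sublist.refl _, List.sublist_cons_self y t2⟩
    intro c hc
    simp only [List.nil_append, List.mem_cons] at hc
    rcases hc with hc | hc
    · exact le_of_eq hc.symm
    · exact (List.pairwise_cons.mp hs2).1 c hc
  | x :: t1, y :: t2 =>
    have hx := (List.pairwise_cons.mp hs1).1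
    have hy := (List.pairwise_cons.mp hs2).1
    simp only [popMin] at h
    split at h
    · rename_i hxy
      simp at h; obtain ⟨h0, h1, h2⟩ := h; subst h0; subst h1; subst h2
      refine ⟨by simp, ?_, List.sublist_cons_self x t1, List.Sublist.refl _⟩
      intro c hc
      simp only [List.cons_append, List.mem_cons, List.mem_append] at hc
      rcases hc with hc | hc | hc
      · exact le_of_eq hc.symm
      · exact hx c hc
      · rcases hc with hc | hc
        · exact hc ▸ hxy
        · exact le_trans hxy (hy c hc)
    · rename_i hxy
      have hyx : y ≤ x := by omega
      simp at h; obtain ⟨h0, h1, h2⟩ := h; subst h0; subst h1; subst h2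
      constructor
      · -- y :: ((x :: t1) ++ t2) ~ (x :: t1) ++ (y :: t2)
        have hswap : (y :: (x :: (t1 ++ t2))).Perm (x :: (y :: (t1 ++ t2))) :=
          List.Perm.swap x y _
        have hmid : (x :: (y :: (t1 ++ t2))).Perm (x :: (t1 ++ y :: t2)) :=
          (List.perm_middle.symm).cons x
        simpa using hswap.trans hmid
      refine ⟨?_, List.Sublist.refl _, List.sublist_cons_self y t2⟩
      intro c hc
      simp only [List.cons_append, List.mem_cons, List.mem_append] at hc
      rcases hc with hc | hc | hc
      · exact hc ▸ hyx
      · exact le_trans hyx (hx c hc)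
      · rcases hc with hc | hc
        · exact le_of_eq hc.symm
        · exact hy c hc

-- the two-queue loop invariant: every pending merged value x that is still ≥ the second
-- minimum is bounded by m1 + 2*m2 (m1, m2 the two smallest of the whole multiset)
def INV (q1 q2 : List Int) : Prop :=
  ∀ x ∈ q2, ∀ m1 m2 : Int, (q1 ++ q2).min? = some m1 →
    ((q1 ++ q2).erase m1).min? = some m2 → m2 ≤ x → x ≤ m1 + 2 * m2

-- arithmetic core of the invariant's preservation
theorem inv_core (a b x m1 m2 : Int) (s : List Int)
    (hab : a ≤ b) (hs : ∀ y ∈ s, b ≤ y)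
    (hx : x ≤ a + 2 * b) (hxb : b ≤ x ∨ x = a + 2 * b)
    (hm1 : (s ++ [a + 2 * b]).min? = some m1)
    (hm2 : ((s ++ [a + 2 * b]).erase m1).min? = some m2)
    (hle : m2 ≤ x) : x ≤ m1 + 2 * m2 := by
  obtain ⟨hm1mem, hm1le⟩ := List.min?_eq_some_iff.mp hm1
  obtain ⟨hm2mem, _⟩ := List.min?_eq_some_iff.mp hm2
  have hm2mem' : m2 ∈ s ++ [a + 2 * b] := List.mem_of_mem_erase hm2mem
  have hcase : ∀ z : Int, z ∈ s ++ [a + 2 * b] → b ≤ z ∨ z = a + 2 * b := by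
    intro z hz
    rcases List.mem_append.mp hz with hz | hz
    · exact Or.inl (hs z hz)
    · exact Or.inr (List.mem_singleton.mp hz)
  -- step 1: 0 ≤ a + b
  have hab0 : 0 ≤ a + b := by
    rcases hxb with hxb | hxb
    · omega
    · rcases hcase m2 hm2mem' with hb2 | hb2
      · omega
      · have hm12 : m1 ≤ m2 := hm1le _ hm2mem'
        rcases hcase m1 hm1mem with hb1 | hb1
        · omega
        · -- m1 = m2 = a+2b: a second copy of the value a+2b must sit in s
          by_cases hmem : (a + 2 * b) ∈ s
          · have := hs _ hmem; omega
          · have herase : (s ++ [a + 2 * b]).erase m1 = s := by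
              rw [hb1, List.erase_append_right _ hmem]
              simp
            rw [herase] at hm2mem
            have := hs _ hm2mem; omega
  -- step 2: hence b ≥ 0, every element ≥ b, and the bound follows
  have hbm : b ≤ a + 2 * b := by omega
  have hall : ∀ z : Int, z ∈ s ++ [a + 2 * b] → b ≤ z := by
    intro z hz
    rcases hcase z hz with h | h
    · exact h
    · omega
  have h1 : b ≤ m1 := hall _ hm1mem
  have h2 : b ≤ m2 := hall _ hm2mem'
  omega

-- main lemma: A's heap contents are a permutation of B's two queues, both queues sorted,
-- the invariant holds — then the two loops return the same answer.
theorem go_eq (n : Nat) : ∀ (lA q1 q2 : List Int) (K ans : Int), lA.length ≤ n →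
    lA.Perm (q1 ++ q2) → q1.Pairwise (· ≤ ·) → q2.Pairwise (· ≤ ·) → INV q1 q2 →
    solutionGo lA K ans = solutionAltGo q1 q2 K ans := by
  induction n with
  | zero =>
    intro lA q1 q2 K ans hn hp _ _ _
    have hA : lA = [] := List.eq_nil_of_length_eq_zero (Nat.le_zero.mp hn)
    subst hA
    have hB : q1 ++ q2 = [] := List.perm_nil.mp hp.symm
    have hq1 : q1 = [] := List.append_eq_nil_iff.mp hB |>.1
    have hq2 : q2 = [] := List.append_eq_nil_iff.mp hB |>.2
    subst hq1; subst hq2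
    simp [solutionGo, solutionAltGo, popMin]
  | succ n ih =>
    intro lA q1 q2 K ans hn hp hs1 hs2 hinv
    rw [solutionGo.eq_def, solutionAltGo.eq_def]
    cases hpop : popMin q1 q2 with
    | none =>
      obtain ⟨hq1, hq2⟩ := popMin_eq_none _ _ hpop
      subst hq1; subst hq2
      have hA : lA = [] := List.perm_nil.mp (by simpa using hp)
      subst hA
      simp
    | some v =>
      obtain ⟨a, r1, r2⟩ := v
      obtain ⟨hperm1, hmin1, hsub1, hsub2⟩ := popMin_spec _ _ _ _ _ hs1 hs2 hpop
      have hminA : lA.min? = some a := by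
        rw [min?_congr_perm lA (q1 ++ q2) hp]
        exact List.min?_eq_some_iff.mpr ⟨hperm1.subset List.mem_cons_self, hmin1⟩
      rw [hminA]
      simp only
      by_cases hK : a < K
      · rw [if_pos hK, if_neg (by omega)]
        -- A pops a; its remaining heap ~ r1 ++ r2
        have hpermErase : (lA.erase a).Perm (r1 ++ r2) := by
          have h1 : lA.Perm (a :: (r1 ++ r2)) := hp.trans hperm1.symm
          have h2 := h1.erase a
          rwa [List.erase_cons_head] at h2
        cases hpop2 : popMin r1 r2 with
        | none =>
          obtain ⟨hr1, hr2⟩ := popMin_eq_none _ _ hpop2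
          subst hr1; subst hr2
          have : lA.erase a = [] := List.perm_nil.mp (by simpa using hpermErase)
          rw [this]
          simp
        | some w =>
          obtain ⟨b, s1, s2⟩ := w
          have hr1s : r1.Pairwise (· ≤ ·) := hs1.sublist hsub1
          have hr2s : r2.Pairwise (· ≤ ·) := hs2.sublist hsub2
          obtain ⟨hperm2, hmin2, hsub1', hsub2'⟩ := popMin_spec _ _ _ _ _ hr1s hr2s hpop2
          have hminB : (lA.erase a).min? = some b := by
            rw [min?_congr_perm _ (r1 ++ r2) hpermErase]
            exact List.min?_eq_some_iff.mpr ⟨hperm2.subset List.mem_cons_self, hmin2⟩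
          rw [hminB]
          simp only
          -- facts for the recursive call
          have hab : a ≤ b := by
            have hbmem : b ∈ r1 ++ r2 := hperm2.subset List.mem_cons_self
            exact hmin1 b (hperm1.subset (List.mem_cons_of_mem a hbmem))
          have hsurv : ∀ y ∈ s1 ++ s2, b ≤ y := by
            intro y hy
            have : y ∈ r1 ++ r2 := by
              rcases List.mem_append.mp hy with h | h
              · exact List.mem_append_left _ (hsub1'.subset h)
              · exact List.mem_append_right _ (hsub2'.subset h)
            exact hmin2 y this
          have hminQ : (q1 ++ q2).min? = some a :=
            List.min?_eq_some_iff.mpr ⟨hperm1.subset List.mem_cons_self, hmin1⟩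
          have hminQ2 : ((q1 ++ q2).erase a).min? = some b := by
            have h1 : ((q1 ++ q2).erase a).Perm (r1 ++ r2) := by
              have h2 := hperm1.symm.erase a
              rwa [List.erase_cons_head] at h2
            rw [min?_congr_perm _ (r1 ++ r2) h1]
            exact List.min?_eq_some_iff.mpr ⟨hperm2.subset List.mem_cons_self, hmin2⟩
          have hq2bound : ∀ x ∈ s2, b ≤ x ∧ x ≤ a + 2 * b := by
            intro x hx
            have hxb : b ≤ x := hsurv x (List.mem_append_right _ hx)
            have hxq2 : x ∈ q2 := hsub2.subset (hsub2'.subset hx)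
            exact ⟨hxb, hinv x hxq2 a b hminQ hminQ2 hxb⟩
          -- recursive call via ih
          have hlenA : lA.length = q1.length + q2.length := hp.length_eq.trans (by simp)
          have e1 := popMin_length _ _ _ _ _ hpop
          have e2 := popMin_length _ _ _ _ _ hpop2
          have hmemA : a ∈ lA := (List.min?_eq_some_iff.mp hminA).1
          have hmemB : b ∈ lA.erase a := (List.min?_eq_some_iff.mp hminB).1
          have hlen1 : (lA.erase a).length = lA.length - 1 := List.length_erase_of_mem hmemA
          have hlen2 : ((lA.erase a).erase b).length = (lA.erase a).length - 1 :=
            List.length_erase_of_mem hmemB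
          have hposA : 0 < lA.length := List.length_pos_of_mem hmemA
          have hposB : 0 < (lA.erase a).length := List.length_pos_of_mem hmemB
          have hba : a + b * 2 = a + 2 * b := by ring
          have hpermNew : (((lA.erase a).erase b) ++ [a + b * 2]).Perm (s1 ++ (s2 ++ [a + 2 * b])) := by
            rw [hba, ← List.append_assoc]
            refine List.Perm.append ?_ (List.Perm.refl _)
            have h1 : ((lA.erase a).erase b).Perm (s1 ++ s2) := by
              have h2 := (hpermErase.trans hperm2.symm).erase b
              rwa [List.erase_cons_head] at h2
            exact h1
          have hs2new : (s2 ++ [a + 2 * b]).Pairwise (· ≤ ·) := by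
            refine List.pairwise_append.mpr ⟨(hr2s.sublist hsub2'), List.pairwise_singleton _ _, ?_⟩
            intro x hx y hy
            rw [List.mem_singleton.mp hy]
            exact (hq2bound x hx).2
          have hinvNew : INV s1 (s2 ++ [a + 2 * b]) := by
            intro x hx m1 m2 hmm1 hmm2 hle
            rw [← List.append_assoc] at hmm1 hmm2
            have hxcases : b ≤ x ∨ x = a + 2 * b := by
              rcases List.mem_append.mp hx with h | h
              · exact Or.inl (hq2bound x h).1
              · exact Or.inr (List.mem_singleton.mp h)
            have hxle : x ≤ a + 2 * b := by
              rcases List.mem_append.mp hx with h | h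
              · exact (hq2bound x h).2
              · exact le_of_eq (List.mem_singleton.mp h)
            exact inv_core a b x m1 m2 (s1 ++ s2) hab hsurv hxle hxcases hmm1 hmm2 hle
          exact ih _ _ _ K (ans + 1) (by simp only [List.length_append, List.length_cons, List.length_nil]; omega)
            hpermNew (hr1s.sublist hsub1') hs2new hinvNew
      · rw [if_neg hK, if_pos (by omega)]

-- ===== VERDICT (by name: the statement is the Claim_ definition above) =====
theorem solution_spec : Claim_equal_solution := by
  intro scoville K _ _
  unfold Spec_solution solution solution_alt
  refine go_eq scoville.length scoville _ [] K 0 (le_refl _) ?_ ?_ (by simp) ?_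
  · simpa using (PySem.List.sorted_perm scoville (fun x => x) false).symm
  · simpa using PySem.List.sorted_pairwise scoville (fun x => x)
  · intro x hx; simp at hx
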